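-- pv_equiv track=rewrite | github.com/edeno/spyglass-skill | scripts/validate_skill.py | resolve_table_fields
-- ===== SOURCE A (Python) =====
-- def resolve_table_fields(class_name, schemas, _seen=None):
--     """Return the transitive set of field names accepted by `class_name`.
--
--     Walks `->` parent references to union inherited PKs into the child's
--     accepted-field set. Returns None for unknown classes so the caller
--     can distinguish "no schema" from "empty schema".
--     """
--     if _seen is None:
--         _seen = set()
--     if class_name in _seen:
--         return set()  # cycle guard (rare, but possible with circular FKs)
--     _seen.add(class_name)
--     schema = schemas.get(class_name)
--     if schema is None:
--         return None
--     fields = set(schema["pk"]) | set(schema["attrs"])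
--     for parent in schema["parents"]:
--         parent_fields = resolve_table_fields(parent, schemas, _seen)
--         if parent_fields is not None:
--             fields |= parent_fields
--     return fields
-- ===== SOURCE B (Python) =====
-- def resolve_table_fields(class_name, schemas, _seen=None):
--     """Return the transitive set of field names accepted by `class_name`.
--
--     Iterative version: an explicit work stack replaces the recursion.
--     Mutates `_seen` in place exactly like the recursive original.
--     Returns None for unknown classes, set() when `class_name` is already seen.
--     """
--     if _seen is None:
--         _seen = set()
--     if class_name in _seen:
--         return set()
--     _seen.add(class_name)
--     schema = schemas.get(class_name)
--     if schema is None: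
--         return None
--     fields = set(schema["pk"]) | set(schema["attrs"])
--     stack = list(reversed(schema["parents"]))
--     while stack:
--         name = stack.pop()
--         if name in _seen:
--             continue
--         _seen.add(name)
--         sch = schemas.get(name)
--         if sch is None:
--             continue
--         fields |= set(sch["pk"]) | set(sch["attrs"])
--         stack.extend(reversed(sch["parents"]))
--     return fields
-- ===== Notes on version B (the rewrite author's own statement) =====
-- stated objective: alternative
-- what changed: The recursive DFS with a shared mutable _seen set is replaced by a single explicit-stack while-loop that accumulates one global field set, so there are no recursive calls or per-level intermediate result sets.
import Mathlib
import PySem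

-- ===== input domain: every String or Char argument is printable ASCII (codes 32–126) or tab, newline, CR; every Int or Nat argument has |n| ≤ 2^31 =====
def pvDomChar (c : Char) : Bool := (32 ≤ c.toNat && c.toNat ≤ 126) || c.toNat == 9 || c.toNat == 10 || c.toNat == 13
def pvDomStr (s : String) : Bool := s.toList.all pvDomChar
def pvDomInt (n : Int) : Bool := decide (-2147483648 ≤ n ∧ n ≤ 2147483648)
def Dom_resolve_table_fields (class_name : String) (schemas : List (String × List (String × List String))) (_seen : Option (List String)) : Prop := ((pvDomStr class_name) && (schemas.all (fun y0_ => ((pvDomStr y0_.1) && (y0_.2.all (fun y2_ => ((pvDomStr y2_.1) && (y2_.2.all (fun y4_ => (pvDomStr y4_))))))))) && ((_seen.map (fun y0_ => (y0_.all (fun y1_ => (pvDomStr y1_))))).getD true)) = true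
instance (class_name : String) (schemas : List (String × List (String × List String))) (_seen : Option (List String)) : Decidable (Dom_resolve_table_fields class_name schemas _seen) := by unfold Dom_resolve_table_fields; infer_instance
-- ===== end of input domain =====

-- B replaces A's recursion by an explicit-stack traversal of the parent graph (alternative
-- decomposition, same cost). Both Pythons mutate `_seen` in place identically; the theorems here
-- are about the RETURN value only.

-- shared helpers: dict lookups (`schemas.get(name)`, `schema["k"]`; the latter is exact under
-- Pre_, which guarantees the key is present where Python would otherwise raise KeyError)
def pvGet (schemas : List (String × List (String × List String))) (name : String) :
    Option (List (String × List String)) :=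
  (PySem.Dict.mk schemas).get? name

def pvKey (schema : List (String × List String)) (k : String) : List String :=
  ((PySem.Dict.mk schema).get? k).getD []

-- ===== PORT A =====
-- the step of A's `for parent in schema["parents"]` loop: state = (fields, _seen)
def stepF (goA : String → List String → Option (List String) × List String)
    (st : List String × List String) (p : String) : List String × List String :=
  match goA p st.2 with
  | (none, s') => (st.1, s')
  | (some pf, s') => (PySem.Set.union st.1 pf, s')

-- A's recursion, fuel only guards totality (schemas.length + 1 is always enough: each
-- recursive descent marks a fresh schema key as seen)
def goA (schemas : List (String × List (String × List String))) :
    Nat → String → List String → Option (List String) × List String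
  | 0, _, seen => (none, seen)
  | fuel + 1, name, seen =>
    if name ∈ seen then (some [], seen)
    else
      let seen1 := PySem.Set.add seen name
      match pvGet schemas name with
      | none => (none, seen1)
      | some schema =>
        let f0 := PySem.Set.union (PySem.Set.ofList (pvKey schema "pk")) (pvKey schema "attrs")
        let r := (pvKey schema "parents").foldl (stepF (goA schemas fuel)) (f0, seen1)
        (some r.1, r.2)

def resolve_table_fields (class_name : String) (schemas : List (String × List (String × List String))) (_seen : Option (List String)) : Option (List String) :=
  let seen0 := _seen.getD []
  (goA schemas (schemas.length + 1) class_name seen0).1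

-- ===== PORT B =====
-- fuel bound for B's while-loop (always sufficient; see the bridge lemma's measure)
def pvParsBound (schemas : List (String × List (String × List String))) : Nat :=
  (schemas.map (fun kv => (pvKey kv.2 "parents").length)).sum

def pvFuelB (schemas : List (String × List (String × List String))) : Nat :=
  (schemas.length + 1) * (pvParsBound schemas + 1) + pvParsBound schemas + 1

-- B's while-loop; the Lean list holds the Python stack reversed (head = top), so Python's
-- `stack.pop()` is taking the head and `stack.extend(reversed(parents))` is `parents ++ rest`
def goB (schemas : List (String × List (String × List String))) :
    Nat → List String → List String → List String → List String × List String
  | 0, _, fields, seen => (fields, seen)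
  | fuel + 1, stack, fields, seen =>
    match stack with
    | [] => (fields, seen)
    | name :: rest =>
      if name ∈ seen then goB schemas fuel rest fields seen
      else
        let seen1 := PySem.Set.add seen name
        match pvGet schemas name with
        | none => goB schemas fuel rest fields seen1
        | some sch =>
          goB schemas fuel (pvKey sch "parents" ++ rest)
            (PySem.Set.union fields
              (PySem.Set.union (PySem.Set.ofList (pvKey sch "pk")) (pvKey sch "attrs")))
            seen1

def resolve_table_fields_alt (class_name : String) (schemas : List (String × List (String × List String))) (_seen : Option (List String)) : Option (List String) :=
  let seen0 := _seen.getD []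
  if class_name ∈ seen0 then some []
  else
    let seen1 := PySem.Set.add seen0 class_name
    match pvGet schemas class_name with
    | none => none
    | some schema =>
      let f0 := PySem.Set.union (PySem.Set.ofList (pvKey schema "pk")) (pvKey schema "attrs")
      some (goB schemas (pvFuelB schemas) (pvKey schema "parents") f0 seen1).1

-- ===== PRECONDITION & SPEC =====
-- Pre_ excludes inputs on which Python A raises KeyError (a reachable schema entry missing one of
-- the "pk"/"attrs"/"parents" keys); it is stated in closed form — all entries well-formed, or the
-- start class is already seen / not a key at all — so it also excludes some inputs where the only
-- malformed entries are unreachable and A still returns (see claim cites).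
def Pre_resolve_table_fields (class_name : String) (schemas : List (String × List (String × List String))) (_seen : Option (List String)) : Prop :=
  (∀ kv ∈ schemas, "pk" ∈ kv.2.map Prod.fst ∧ "attrs" ∈ kv.2.map Prod.fst ∧ "parents" ∈ kv.2.map Prod.fst)
    ∨ class_name ∈ _seen.getD [] ∨ class_name ∉ schemas.map Prod.fst
instance (class_name : String) (schemas : List (String × List (String × List String))) (_seen : Option (List String)) : Decidable (Pre_resolve_table_fields class_name schemas _seen) := by unfold Pre_resolve_table_fields; infer_instance

def pvWitness_resolve_table_fields : String × (List (String × List (String × List String))) × Option (List String) :=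
  ("A", [("A", [("pk", ["id"]), ("attrs", ["x"]), ("parents", ["B"])]),
         ("B", [("pk", ["bid"]), ("attrs", []), ("parents", [])])], none)

def Spec_resolve_table_fields (class_name : String) (schemas : List (String × List (String × List String))) (_seen : Option (List String)) (out : Option (List String)) : Prop := out = resolve_table_fields_alt class_name schemas _seen
instance (class_name : String) (schemas : List (String × List (String × List String))) (_seen : Option (List String)) (out : Option (List String)) : Decidable (Spec_resolve_table_fields class_name schemas _seen out) := by unfold Spec_resolve_table_fields; infer_instance

-- ===== CLAIM (what is proved, stated in full; the proofs are below) =====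
def Claim_equal_resolve_table_fields : Prop := ∀ (class_name : String) (schemas : List (String × List (String × List String))) (_seen : Option (List String)), Dom_resolve_table_fields class_name schemas _seen → Pre_resolve_table_fields class_name schemas _seen → Spec_resolve_table_fields class_name schemas _seen (resolve_table_fields class_name schemas _seen)

-- ===== LEMMAS AND PROOFS =====

-- the number of schema keys not yet seen: the decreasing quantity of both traversals
def keysNot (schemas : List (String × List (String × List String))) (seen : List String) : Nat :=
  ((schemas.map Prod.fst).filter (fun k => !decide (k ∈ seen))).length

theorem cnt_mono (l : List String) {s s' : List String} (h : ∀ x ∈ s, x ∈ s') :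
    (l.filter (fun k => !decide (k ∈ s'))).length ≤ (l.filter (fun k => !decide (k ∈ s))).length := by
  induction l with
  | nil => simp
  | cons k t ih =>
    by_cases hk : k ∈ s'
    · by_cases hks : k ∈ s
      · simpa only [List.filter_cons, show (!decide (k ∈ s')) = false from by simp [hk],
          show (!decide (k ∈ s)) = false from by simp [hks], Bool.false_eq_true, if_false] using ih
      · simp only [List.filter_cons, show (!decide (k ∈ s')) = false from by simp [hk],
          show (!decide (k ∈ s)) = true from by simp [hks], Bool.false_eq_true, if_false, if_true,
          List.length_cons]
        omega
    · have hks : k ∉ s := fun hmem => hk (h k hmem)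
      simp only [List.filter_cons, show (!decide (k ∈ s')) = true from by simp [hk],
        show (!decide (k ∈ s)) = true from by simp [hks], if_true, List.length_cons]
      omega

theorem cnt_add_of_not_mem (l : List String) {seen : List String} {name : String}
    (h : name ∉ l) :
    (l.filter (fun k => !decide (k ∈ PySem.Set.add seen name))).length
      = (l.filter (fun k => !decide (k ∈ seen))).length := by
  congr 1
  apply List.filter_congr
  intro k hk
  have hne : k ≠ name := fun e => h (e ▸ hk)
  simp [PySem.Set.mem_add, hne]

theorem cnt_add_lt (l : List String) {seen : List String} {name : String}
    (hl : name ∈ l) (hs : name ∉ seen) :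
    (l.filter (fun k => !decide (k ∈ PySem.Set.add seen name))).length
      < (l.filter (fun k => !decide (k ∈ seen))).length := by
  induction l with
  | nil => simp at hl
  | cons k t ih =>
    by_cases hk : k = name
    · subst hk
      have hm := cnt_mono (s := seen) (s' := PySem.Set.add seen k) t
        (fun x hx => by simp [PySem.Set.mem_add, hx])
      simp only [List.filter_cons,
        show (!decide (k ∈ PySem.Set.add seen k)) = false from by simp [PySem.Set.mem_add],
        show (!decide (k ∈ seen)) = true from by simp [hs], Bool.false_eq_true, if_false, if_true,
        List.length_cons]
      omega
    · have hlt : name ∈ t := by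
        cases hl with
        | head => exact absurd rfl hk
        | tail _ h => exact h
      have heq : (!decide (k ∈ PySem.Set.add seen name) : Bool) = !decide (k ∈ seen) := by
        simp [PySem.Set.mem_add, hk]
      have := ih hlt
      simp only [List.filter_cons, heq]
      by_cases hks : k ∈ seen
      · simp only [show (!decide (k ∈ seen)) = false from by simp [hks], Bool.false_eq_true,
          if_false]
        omega
      · simp only [show (!decide (k ∈ seen)) = true from by simp [hks], if_true, List.length_cons]
        omega

theorem keysNot_le (schemas : List (String × List (String × List String))) (seen : List String) :
    keysNot schemas seen ≤ schemas.length := by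
  calc ((schemas.map Prod.fst).filter _).length ≤ (schemas.map Prod.fst).length :=
        List.length_filter_le _ _
    _ = schemas.length := List.length_map ..

theorem keysNot_mono (schemas : List (String × List (String × List String)))
    {s s' : List String} (h : ∀ x ∈ s, x ∈ s') :
    keysNot schemas s' ≤ keysNot schemas s :=
  cnt_mono _ h

theorem keysNot_add_lt (schemas : List (String × List (String × List String)))
    {seen : List String} {name : String} (hk : name ∈ schemas.map Prod.fst) (hs : name ∉ seen) :
    keysNot schemas (PySem.Set.add seen name) < keysNot schemas seen :=
  cnt_add_lt _ hk hs

-- name is a key whenever its lookup succeeds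
theorem mem_keys_of_pvGet (schemas : List (String × List (String × List String)))
    {name : String} {sch : List (String × List String)} (h : pvGet schemas name = some sch) :
    name ∈ schemas.map Prod.fst := by
  by_contra hn
  have : pvGet schemas name = none := by
    apply (PySem.Dict.get?_eq_none_iff_not_mem_keys _ _).2
    simpa [PySem.Dict.keys] using hn
  simp [this] at h

theorem pvGet_none_not_key (schemas : List (String × List (String × List String)))
    {name : String} (h : pvGet schemas name = none) : name ∉ schemas.map Prod.fst := by
  have := (PySem.Dict.get?_eq_none_iff_not_mem_keys (PySem.Dict.mk schemas) name).1 h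
  simpa [PySem.Dict.keys] using this

theorem keysNot_add_of_none (schemas : List (String × List (String × List String)))
    {seen : List String} {name : String} (h : pvGet schemas name = none) :
    keysNot schemas (PySem.Set.add seen name) = keysNot schemas seen :=
  cnt_add_of_not_mem _ (pvGet_none_not_key schemas h)

-- the `_seen` component of a step is the recursive call's `_seen`, whatever the first component
theorem stepF_snd (go : String → List String → Option (List String) × List String)
    (st : List String × List String) (p : String) : (stepF go st p).2 = (go p st.2).2 := by
  rcases h : go p st.2 with ⟨r, s'⟩
  cases r <;> simp [stepF, h]

-- `_seen` only grows
theorem mem_foldl_stepF (go : String → List String → Option (List String) × List String)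
    (hgo : ∀ (name : String) (seen : List String) (x : String), x ∈ seen → x ∈ (go name seen).2) :
    ∀ (l : List String) (st : List String × List String) (x : String), x ∈ st.2 →
      x ∈ (l.foldl (stepF go) st).2 := by
  intro l
  induction l with
  | nil => intro st x hx; simpa using hx
  | cons p l ih =>
    intro st x hx
    simp only [List.foldl_cons]
    exact ih _ x (by rw [stepF_snd]; exact hgo p st.2 x hx)

theorem mem_goA_seen (schemas : List (String × List (String × List String))) :
    ∀ (fuel : Nat) (name : String) (seen : List String) (x : String), x ∈ seen →
      x ∈ (goA schemas fuel name seen).2 := by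
  intro fuel
  induction fuel with
  | zero => intro name seen x hx; simpa [goA] using hx
  | succ fuel ih =>
    intro name seen x hx
    simp only [goA]
    by_cases hn : name ∈ seen
    · simpa [hn] using hx
    · rw [if_neg hn]
      have hx1 : x ∈ PySem.Set.add seen name := by simp [PySem.Set.mem_add, hx]
      cases hget : pvGet schemas name with
      | none => simpa using hx1
      | some sch =>
        simpa using mem_foldl_stepF (goA schemas fuel) (ih) _ _ x hx1

-- with enough fuel, neither fold nor recursion depends on the fuel
theorem foldA_congr (schemas : List (String × List (String × List String))) (n g₁ g₂ : Nat)
    (hgo : ∀ (name : String) (seen : List String), keysNot schemas seen ≤ n →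
      keysNot schemas seen < g₁ → keysNot schemas seen < g₂ →
      goA schemas g₁ name seen = goA schemas g₂ name seen) :
    ∀ (l : List String) (st : List String × List String), keysNot schemas st.2 ≤ n →
      keysNot schemas st.2 < g₁ → keysNot schemas st.2 < g₂ →
      l.foldl (stepF (goA schemas g₁)) st = l.foldl (stepF (goA schemas g₂)) st := by
  intro l
  induction l with
  | nil => intros; rfl
  | cons p l ih =>
    intro st hn h1 h2
    simp only [List.foldl_cons]
    have hstep : stepF (goA schemas g₁) st p = stepF (goA schemas g₂) st p := by
      unfold stepF
      rw [hgo p st.2 hn h1 h2]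
    rw [hstep]
    have hsub : ∀ x ∈ st.2, x ∈ (stepF (goA schemas g₂) st p).2 := by
      intro x hx
      rw [stepF_snd]
      exact mem_goA_seen schemas g₂ p st.2 x hx
    have hmono := keysNot_mono schemas hsub
    exact ih _ (le_trans hmono hn) (lt_of_le_of_lt hmono h1) (lt_of_le_of_lt hmono h2)

theorem goA_congr (schemas : List (String × List (String × List String))) :
    ∀ (n f₁ f₂ : Nat) (name : String) (seen : List String), keysNot schemas seen ≤ n →
      keysNot schemas seen < f₁ → keysNot schemas seen < f₂ →
      goA schemas f₁ name seen = goA schemas f₂ name seen := by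
  intro n
  induction n with
  | zero =>
    intro f₁ f₂ name seen hn h1 h2
    obtain ⟨a, rfl⟩ : ∃ a, f₁ = a + 1 := ⟨f₁ - 1, by omega⟩
    obtain ⟨b, rfl⟩ : ∃ b, f₂ = b + 1 := ⟨f₂ - 1, by omega⟩
    simp only [goA]
    by_cases hs : name ∈ seen
    · simp [hs]
    · rw [if_neg hs, if_neg hs]
      cases hget : pvGet schemas name with
      | none => rfl
      | some sch =>
        exact absurd (keysNot_add_lt schemas (mem_keys_of_pvGet schemas hget) hs) (by omega)
  | succ n ih =>
    intro f₁ f₂ name seen hn h1 h2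
    obtain ⟨a, rfl⟩ : ∃ a, f₁ = a + 1 := ⟨f₁ - 1, by omega⟩
    obtain ⟨b, rfl⟩ : ∃ b, f₂ = b + 1 := ⟨f₂ - 1, by omega⟩
    simp only [goA]
    by_cases hs : name ∈ seen
    · simp [hs]
    · rw [if_neg hs, if_neg hs]
      cases hget : pvGet schemas name with
      | none => rfl
      | some sch =>
        have hlt := keysNot_add_lt schemas (mem_keys_of_pvGet schemas hget) hs
        have hfold := foldA_congr schemas n a b
          (fun nm sn h1' h2' h3' => ih a b nm sn h1' h2' h3')
          (pvKey sch "parents")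
          (PySem.Set.union (PySem.Set.ofList (pvKey sch "pk")) (pvKey sch "attrs"),
            PySem.Set.add seen name)
          (by simp; omega) (by simp; omega) (by simp; omega)
        simp only [hfold]

-- ordered-set union is associative
theorem set_update_add (a b : List String) (x : String) :
    PySem.Set.update a (PySem.Set.add b x) = PySem.Set.add (PySem.Set.update a b) x := by
  by_cases hx : x ∈ b
  · rw [PySem.Set.add_of_mem hx, PySem.Set.add_of_mem (by simp [PySem.Set.mem_update, hx])]
  · rw [PySem.Set.add_of_not_mem hx, PySem.Set.update_append, PySem.Set.update_cons]; rfl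

theorem set_union_assoc (a b c : List String) :
    PySem.Set.union (PySem.Set.union a b) c = PySem.Set.union a (PySem.Set.union b c) := by
  show PySem.Set.update (PySem.Set.update a b) c = PySem.Set.update a (PySem.Set.update b c)
  induction c generalizing b with
  | nil => rfl
  | cons x c ihc =>
    rw [PySem.Set.update_cons, PySem.Set.update_cons, ← ihc (PySem.Set.add b x), set_update_add]

-- A's parent fold distributes over a pre-accumulated field set
theorem foldA_distrib (schemas : List (String × List (String × List String))) (F : Nat) :
    ∀ (l : List String) (fields g s : List String),
      l.foldl (stepF (goA schemas F)) (PySem.Set.union fields g, s) =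
        (PySem.Set.union fields (l.foldl (stepF (goA schemas F)) (g, s)).1,
         (l.foldl (stepF (goA schemas F)) (g, s)).2) := by
  intro l
  induction l with
  | nil => intros; rfl
  | cons p l ih =>
    intro fields g s
    simp only [List.foldl_cons]
    rcases hgo : goA schemas F p s with ⟨r, s'⟩
    cases r with
    | none => simp only [stepF, hgo]; exact ih fields g s'
    | some pf =>
      simp only [stepF, hgo, set_union_assoc]
      exact ih fields (PySem.Set.union g pf) s'

theorem pars_le (schemas : List (String × List (String × List String)))
    {name : String} {sch : List (String × List String)} (h : pvGet schemas name = some sch) :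
    (pvKey sch "parents").length ≤ pvParsBound schemas := by
  have h' : (PySem.Dict.mk schemas).get? name = some sch := h
  have hmem : (name, sch) ∈ schemas := by
    simpa [PySem.Dict.items] using PySem.Dict.mem_items_of_get?_eq_some _ h'
  have hmem2 : (pvKey sch "parents").length ∈
      schemas.map (fun kv => (pvKey kv.2 "parents").length) :=
    List.mem_map_of_mem hmem
  exact List.single_le_sum (fun _ _ => Nat.zero_le _) _ hmem2

-- the bridge: B's stack loop computes exactly A's fold of recursive calls over the stack
theorem bridge (schemas : List (String × List (String × List String))) :
    ∀ (fuelB : Nat) (stack fields seen : List String),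
      keysNot schemas seen * (pvParsBound schemas + 1) + stack.length ≤ fuelB →
      goB schemas fuelB stack fields seen =
        stack.foldl (stepF (goA schemas (schemas.length + 1))) (fields, seen) := by
  intro fuelB
  induction fuelB with
  | zero =>
    intro stack fields seen h
    have : stack = [] := by
      cases stack with
      | nil => rfl
      | cons a t => simp at h
    subst this; rfl
  | succ fuelB ih =>
    intro stack fields seen h
    cases stack with
    | nil => rfl
    | cons name rest =>
      simp only [goB, List.foldl_cons]
      by_cases hs : name ∈ seen
      · rw [if_pos hs]
        have hstep : stepF (goA schemas (schemas.length + 1)) (fields, seen) name =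
            (fields, seen) := by
          simp only [stepF, goA, hs, if_true]
          rfl
        rw [hstep, ih rest fields seen (by simp at h ⊢; omega)]
      · rw [if_neg hs]
        cases hget : pvGet schemas name with
        | none =>
          have hstep : stepF (goA schemas (schemas.length + 1)) (fields, seen) name =
              (fields, PySem.Set.add seen name) := by
            simp [stepF, goA, hs, hget]
          rw [hstep]
          have hk := keysNot_add_of_none schemas (seen := seen) hget
          dsimp only
          rw [ih rest fields (PySem.Set.add seen name) (by rw [hk]; simp at h ⊢; omega)]
        | some sch =>
          have hkey := mem_keys_of_pvGet schemas hget
          have hlt := keysNot_add_lt schemas hkey hs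
          have hp := pars_le schemas hget
          -- A's step at this stack entry
          have hfoldK : (pvKey sch "parents").foldl
                (stepF (goA schemas (schemas.length))) 
                (PySem.Set.union (PySem.Set.ofList (pvKey sch "pk")) (pvKey sch "attrs"),
                  PySem.Set.add seen name) =
              (pvKey sch "parents").foldl
                (stepF (goA schemas (schemas.length + 1)))
                (PySem.Set.union (PySem.Set.ofList (pvKey sch "pk")) (pvKey sch "attrs"),
                  PySem.Set.add seen name) := by
            have hle := keysNot_le schemas seen
            exact foldA_congr schemas (keysNot schemas (PySem.Set.add seen name))
              (schemas.length) (schemas.length + 1)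
              (fun nm sn h1 h2 h3 => goA_congr schemas _ _ _ nm sn h1 h2 h3)
              _ _ (by simp) (by simp; omega) (by simp; omega)
          have hstep : stepF (goA schemas (schemas.length + 1)) (fields, seen) name =
              (PySem.Set.union fields
                ((pvKey sch "parents").foldl (stepF (goA schemas (schemas.length + 1)))
                  (PySem.Set.union (PySem.Set.ofList (pvKey sch "pk")) (pvKey sch "attrs"),
                    PySem.Set.add seen name)).1,
                ((pvKey sch "parents").foldl (stepF (goA schemas (schemas.length + 1)))
                  (PySem.Set.union (PySem.Set.ofList (pvKey sch "pk")) (pvKey sch "attrs"),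
                    PySem.Set.add seen name)).2) := by
            simp only [stepF, goA, if_neg hs, hget, hfoldK]
          dsimp only
          rw [hstep]
          rw [ih (pvKey sch "parents" ++ rest)
              (PySem.Set.union fields
                (PySem.Set.union (PySem.Set.ofList (pvKey sch "pk")) (pvKey sch "attrs")))
              (PySem.Set.add seen name)
              (by simp at h ⊢; nlinarith [hlt, hp, h])]
          rw [List.foldl_append]
          rw [foldA_distrib]

-- ===== VERDICT (by name: the statement is the Claim_ definition above) =====
theorem resolve_table_fields_spec : Claim_equal_resolve_table_fields := by
  intro class_name schemas _seen _hdom _hpre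
  unfold Spec_resolve_table_fields resolve_table_fields resolve_table_fields_alt
  simp only []
  set seen0 := _seen.getD [] with hseen0
  by_cases hs : class_name ∈ seen0
  · simp [goA, hs]
  · rw [if_neg hs]
    cases hget : pvGet schemas class_name with
    | none => simp [goA, hs, hget]
    | some sch =>
      have hkey := mem_keys_of_pvGet schemas hget
      have hlt := keysNot_add_lt schemas hkey hs
      have hle := keysNot_le schemas seen0
      have hp := pars_le schemas hget
      simp only [goA, if_neg hs, hget]
      rw [bridge schemas (pvFuelB schemas) (pvKey sch "parents")
          (PySem.Set.union (PySem.Set.ofList (pvKey sch "pk")) (pvKey sch "attrs"))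
          (PySem.Set.add seen0 class_name)
          (by
            unfold pvFuelB
            have h1 : keysNot schemas (PySem.Set.add seen0 class_name) ≤ schemas.length := by omega
            nlinarith [hp, h1])]
      have hfoldK : (pvKey sch "parents").foldl
            (stepF (goA schemas (schemas.length)))
            (PySem.Set.union (PySem.Set.ofList (pvKey sch "pk")) (pvKey sch "attrs"),
              PySem.Set.add seen0 class_name) =
          (pvKey sch "parents").foldl
            (stepF (goA schemas (schemas.length + 1)))
            (PySem.Set.union (PySem.Set.ofList (pvKey sch "pk")) (pvKey sch "attrs"),
              PySem.Set.add seen0 class_name) := by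
        exact foldA_congr schemas (keysNot schemas (PySem.Set.add seen0 class_name))
          (schemas.length) (schemas.length + 1)
          (fun nm sn h1 h2 h3 => goA_congr schemas _ _ _ nm sn h1 h2 h3)
          _ _ (by dsimp only; exact le_rfl) (by dsimp only; omega) (by dsimp only; omega)
      rw [hfoldK]
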